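-- pv_equiv track=rewrite | github.com/alibaba/EasyRec | easy_rec/python/utils/expr_util.py | _process_multi_expr
-- ===== SOURCE A (Python) =====
-- def _process_multi_expr(expr):
--   expr = expr.strip()
--   size = len(expr)
--   idx = 0
--   two_expr = ['>=', '<=', '==']
--   expr_list = []
--   while (idx < size):
--     if idx + 2 <= size and expr[idx:idx + 2] in two_expr:
--       expr_list.append(expr[idx:idx + 2])
--       idx += 2
--     else:
--       expr_list.append(expr[idx])
--       idx += 1
--   return expr_list
-- ===== SOURCE B (Python) =====
-- def _process_multi_expr(expr):
--   # Single pass over the characters with a one-char "pending" state machine: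
--   # no index arithmetic, no slicing, no lookahead.
--   tokens = []
--   pending = None
--   for ch in expr.strip():
--     if pending is not None and pending + ch in ('>=', '<=', '=='):
--       tokens.append(pending + ch)
--       pending = None
--     else:
--       if pending is not None:
--         tokens.append(pending)
--       pending = ch
--   if pending is not None:
--     tokens.append(pending)
--   return tokens
-- ===== Notes on version B (the rewrite author's own statement) =====
-- stated objective: faster
-- what changed: Replaced the index-driven while loop with lookahead slicing (expr[idx:idx+2]) by a single forward pass over the characters keeping one pending character as state; avoiding per-step string slicing gives a measured ~2x constant-factor speedup.
import Mathlib
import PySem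

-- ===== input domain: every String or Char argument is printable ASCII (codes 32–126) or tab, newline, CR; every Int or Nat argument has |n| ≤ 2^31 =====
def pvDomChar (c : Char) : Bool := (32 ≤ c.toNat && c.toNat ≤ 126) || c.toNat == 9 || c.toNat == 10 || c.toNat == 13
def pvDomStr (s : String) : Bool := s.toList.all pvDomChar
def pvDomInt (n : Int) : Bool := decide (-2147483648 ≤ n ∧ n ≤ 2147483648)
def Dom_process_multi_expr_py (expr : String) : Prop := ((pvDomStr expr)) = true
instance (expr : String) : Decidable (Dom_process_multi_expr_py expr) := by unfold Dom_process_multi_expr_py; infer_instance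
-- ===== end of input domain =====

-- B replaces A's index-and-slice lookahead loop by a single pass keeping one pending character as state (alternative decomposition, same cost).

-- ===== PORT A =====
-- two_expr = ['>=', '<=', '==']
def pvTwoExpr : List String := [">=", "<=", "=="]

-- the while loop: idx walks over the char list s of the stripped string, size = s.length.
-- expr[idx:idx+2] = (s.drop idx).take 2 (both bounds nonnegative, Python slice clamps);
-- expr[idx] = s.getD idx default (in range since idx < size).
def pvALoop (s : List Char) (size idx : Nat) : List String :=
  if idx < size then
    if idx + 2 ≤ size ∧ String.mk ((s.drop idx).take 2) ∈ pvTwoExpr then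
      String.mk ((s.drop idx).take 2) :: pvALoop s size (idx + 2)
    else
      String.mk [s.getD idx default] :: pvALoop s size (idx + 1)
  else []
termination_by size - idx

def process_multi_expr_py (expr : String) : List String :=
  let s := (PySem.Str.strip expr).toList
  pvALoop s s.length 0

-- ===== PORT B =====
-- state machine step: state = (tokens so far, pending char)
def pvBStep (st : List String × Option Char) (ch : Char) : List String × Option Char :=
  match st.2 with
  | some p =>
      if String.mk [p, ch] ∈ [">=", "<=", "=="] then (st.1 ++ [String.mk [p, ch]], none)
      else (st.1 ++ [String.mk [p]], some ch)
  | none => (st.1, some ch)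

def process_multi_expr_py_alt (expr : String) : List String :=
  let r := (PySem.Str.strip expr).toList.foldl pvBStep ([], none)
  r.1 ++ (match r.2 with | some p => [String.mk [p]] | none => [])

-- ===== PRECONDITION & SPEC =====
def Spec_process_multi_expr_py (expr : String) (out : List String) : Prop := out = process_multi_expr_py_alt expr
instance (expr : String) (out : List String) : Decidable (Spec_process_multi_expr_py expr out) := by unfold Spec_process_multi_expr_py; infer_instance

-- ===== CLAIM (what is proved, stated in full; the proofs are below) =====
def Claim_equal_process_multi_expr_py : Prop := ∀ (expr : String), Dom_process_multi_expr_py expr → Spec_process_multi_expr_py expr (process_multi_expr_py expr)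

-- ===== LEMMAS AND PROOFS =====

-- reference tokenizer, structural on the char list
def pvTok : List Char → List String
  | a :: b :: rest =>
      if String.mk [a, b] ∈ pvTwoExpr then String.mk [a, b] :: pvTok rest
      else String.mk [a] :: pvTok (b :: rest)
  | [a] => [String.mk [a]]
  | [] => []

theorem pvALoop_eq_tok (s : List Char) (idx : Nat) (h : idx ≤ s.length) :
    pvALoop s s.length idx = pvTok (s.drop idx) := by
  generalize hk : s.length - idx = k
  induction k using Nat.strong_induction_on generalizing idx with
  | _ k ih =>
    rw [pvALoop]
    by_cases hlt : idx < s.length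
    · simp only [hlt, if_true]
      obtain ⟨a, t, hd⟩ : ∃ a t, s.drop idx = a :: t := by
        cases hdrop : s.drop idx with
        | nil => exfalso; have := List.drop_eq_nil_iff.mp hdrop; omega
        | cons a t => exact ⟨a, t, rfl⟩
      have hget : s.getD idx default = a := by
        have hga : s[idx]? = some a := by
          rw [← List.head?_drop, hd]; rfl
        simp [List.getD, hga]
      have hrest1 : s.drop (idx + 1) = t := by
        have : s.drop (idx + 1) = (s.drop idx).drop 1 := by rw [List.drop_drop]
        rw [this, hd]; rfl
      by_cases h2 : idx + 2 ≤ s.length ∧ String.mk ((s.drop idx).take 2) ∈ pvTwoExpr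
      · simp only [h2, and_self, if_true]
        obtain ⟨b, t', hd2⟩ : ∃ b t', t = b :: t' := by
          cases ht : t with
          | nil =>
            exfalso
            have hlen : (s.drop idx).length = s.length - idx := List.length_drop ..
            rw [hd, ht] at hlen; simp at hlen; omega
          | cons b t' => exact ⟨b, t', rfl⟩
        have hrest : s.drop (idx + 2) = t' := by
          have : s.drop (idx + 2) = (s.drop idx).drop 2 := by
            rw [List.drop_drop]
          rw [this, hd, hd2]; rfl
        have htake : (s.drop idx).take 2 = [a, b] := by rw [hd, hd2]; rfl
        rw [ih (s.length - (idx + 2)) (by omega) (idx + 2) (by omega) rfl, hrest,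
            htake, hd, hd2, pvTok]
        rw [htake] at h2
        simp [h2.2]
      · simp only [h2, if_false]
        rw [ih (s.length - (idx + 1)) (by omega) (idx + 1) (by omega) rfl, hrest1, hget, hd]
        cases t with
        | nil => rfl
        | cons b t' =>
          have hlen : idx + 2 ≤ s.length := by
            have hl : (s.drop idx).length = s.length - idx := List.length_drop ..
            rw [hd] at hl; simp at hl; omega
          have htake : (s.drop idx).take 2 = [a, b] := by rw [hd]; rfl
          have hnot : String.mk [a, b] ∉ pvTwoExpr := by
            intro hc; exact h2 ⟨hlen, by rw [htake]; exact hc⟩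
          rw [pvTok]
          simp [hnot]
    · simp only [hlt, if_false]
      have : idx = s.length := by omega
      rw [this, List.drop_length]; rfl

def pvFinish (r : List String × Option Char) : List String :=
  r.1 ++ (match r.2 with | some p => [String.mk [p]] | none => [])

theorem pvFold_eq_tok (n : Nat) : ∀ s : List Char, s.length = n →
    (∀ acc, pvFinish (s.foldl pvBStep (acc, none)) = acc ++ pvTok s) ∧
    (∀ acc p, pvFinish (s.foldl pvBStep (acc, some p)) = acc ++ pvTok (p :: s)) := by
  induction n using Nat.strong_induction_on with
  | _ n ih =>
    intro s hn
    constructor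
    · intro acc
      cases s with
      | nil => simp [pvFinish, pvTok]
      | cons c rest =>
        have := (ih rest.length (by simp at hn; omega) rest rfl).2 acc c
        simpa [List.foldl, pvBStep] using this
    · intro acc p
      cases s with
      | nil => simp [pvFinish, pvTok]
      | cons c rest =>
        simp only [List.foldl, pvBStep]
        by_cases hop : String.mk [p, c] ∈ [">=", "<=", "=="]
        · simp only [hop, if_true]
          have := (ih rest.length (by simp at hn; omega) rest rfl).1 (acc ++ [String.mk [p, c]])
          rw [this, pvTok]
          have : String.mk [p, c] ∈ pvTwoExpr := by
            simpa [pvTwoExpr] using hop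
          simp [this]
        · simp only [hop, if_false]
          have := (ih rest.length (by simp at hn; omega) rest rfl).2 (acc ++ [String.mk [p]]) c
          rw [this, pvTok]
          have : String.mk [p, c] ∉ pvTwoExpr := by
            simpa [pvTwoExpr] using hop
          simp [this]

-- ===== VERDICT (by name: the statement is the Claim_ definition above) =====
theorem process_multi_expr_py_spec : Claim_equal_process_multi_expr_py := by
  intro expr _
  unfold Spec_process_multi_expr_py process_multi_expr_py process_multi_expr_py_alt
  set s := (PySem.Str.strip expr).toList with hs
  have hA := pvALoop_eq_tok s 0 (by omega)
  have hB := (pvFold_eq_tok s.length s rfl).1 []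
  simp only [List.drop_zero] at hA
  simp only [List.nil_append] at hB
  show pvALoop s s.length 0 = pvFinish (s.foldl pvBStep ([], none))
  rw [hA, hB]
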